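-- pv_equiv track=rewrite | github.com/FranciscoMorales1/Gramaticas-presentaci-n-1 | Todos.py | parse_grammar_3
-- ===== SOURCE A (Python) =====
-- def parse_grammar_3(tokens):
--     """Gramática: a^n b^m donde n≥1, m≥1"""
--     if len(tokens) < 2:
--         return False
--
--     # Contar 'a's al inicio
--     a_count = 0
--     i = 0
--     while i < len(tokens) and tokens[i] == 'a':
--         a_count += 1
--         i += 1
--
--     # Debe haber al menos una 'a'
--     if a_count == 0:
--         return False
--
--     # Contar 'b's al final
--     b_count = 0
--     while i < len(tokens) and tokens[i] == 'b':
--         b_count += 1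
--         i += 1
--
--     # Debe haber al menos una 'b' y no deben quedar tokens
--     return b_count > 0 and i == len(tokens)
-- ===== SOURCE B (Python) =====
-- def parse_grammar_3(tokens):
--     """Gramática: a^n b^m donde n≥1, m≥1 — single-pass run-length compression."""
--     groups = []
--     for t in tokens:
--         if groups and groups[-1][0] == t:
--             groups[-1][1] += 1
--         else:
--             groups.append([t, 1])
--     return len(groups) == 2 and groups[0][0] == 'a' and groups[1][0] == 'b'
-- ===== Notes on version B (the rewrite author's own statement) =====
-- stated objective: alternative
-- what changed: Replaces the length guard plus two positional counting while-loops with a single-pass run-length compression into groups, then validates the shape: exactly two groups with keys 'a' then 'b'.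
import Mathlib
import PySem

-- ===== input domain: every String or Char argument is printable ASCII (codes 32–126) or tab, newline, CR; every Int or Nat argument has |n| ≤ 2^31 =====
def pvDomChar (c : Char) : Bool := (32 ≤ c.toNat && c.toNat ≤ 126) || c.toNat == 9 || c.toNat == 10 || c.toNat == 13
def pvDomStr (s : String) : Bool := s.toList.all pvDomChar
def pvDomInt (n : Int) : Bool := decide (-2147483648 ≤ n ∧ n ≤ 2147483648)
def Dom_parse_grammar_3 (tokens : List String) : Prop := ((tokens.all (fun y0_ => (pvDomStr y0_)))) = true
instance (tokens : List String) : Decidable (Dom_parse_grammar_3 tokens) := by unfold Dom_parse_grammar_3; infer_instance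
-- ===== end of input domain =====

-- B replaces A's length guard + two counting while-loops with a single-pass run-length
-- compression into groups, then checks the shape: exactly two groups keyed 'a' then 'b'.


-- ===== PORT A =====
-- the two while-loops of A: count leading tokens equal to k, return (count, rest)
def countRun (k : String) : List String → Nat × List String
  | [] => (0, [])
  | x :: xs =>
    if x == k then ((countRun k xs).1 + 1, (countRun k xs).2)
    else (0, x :: xs)

def parse_grammar_3 (tokens : List String) : Bool :=
  if tokens.length < 2 then false
  else
    let p := countRun "a" tokens
    if p.1 == 0 then false
    else
      let q := countRun "b" p.2
      decide (q.1 > 0) && q.2.isEmpty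

-- ===== PORT B =====
-- B's loop body: groups are kept with the current (last) group at the HEAD of acc
-- (the fold transcription of Python's append-at-end / mutate groups[-1])
def grpStep (acc : List (String × Nat)) (t : String) : List (String × Nat) :=
  match acc with
  | (k, n) :: rest => if k == t then (k, n + 1) :: rest else (t, 1) :: (k, n) :: rest
  | [] => [(t, 1)]

def parse_grammar_3_alt (tokens : List String) : Bool :=
  match (tokens.foldl grpStep []).reverse with
  | [(k1, _), (k2, _)] => k1 == "a" && k2 == "b"
  | _ => false

-- ===== PRECONDITION & SPEC =====
def Spec_parse_grammar_3 (tokens : List String) (out : Bool) : Prop := out = parse_grammar_3_alt tokens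
instance (tokens : List String) (out : Bool) : Decidable (Spec_parse_grammar_3 tokens out) := by unfold Spec_parse_grammar_3; infer_instance

-- ===== CLAIM (what is proved, stated in full; the proofs are below) =====
def Claim_equal_parse_grammar_3 : Prop := ∀ (tokens : List String), Dom_parse_grammar_3 tokens → Spec_parse_grammar_3 tokens (parse_grammar_3 tokens)

-- ===== LEMMAS AND PROOFS =====

theorem countRun_cons_pos (k x : String) (xs : List String) (h : x = k) :
    countRun k (x :: xs) = ((countRun k xs).1 + 1, (countRun k xs).2) := by
  simp only [countRun, h, beq_self_eq_true, if_true]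

theorem countRun_cons_neg (k x : String) (xs : List String) (h : x ≠ k) :
    countRun k (x :: xs) = (0, x :: xs) := by
  simp [countRun, h]

-- folding grpStep over xs from a head group (k, n) absorbs exactly the leading run of k
theorem foldl_grpStep_run (xs : List String) (k : String) (n : Nat) (acc : List (String × Nat)) :
    List.foldl grpStep ((k, n) :: acc) xs
      = List.foldl grpStep ((k, n + (countRun k xs).1) :: acc) (countRun k xs).2 := by
  induction xs generalizing n with
  | nil => simp [countRun]
  | cons x xs ih =>
    by_cases hx : x = k
    · subst hx
      simp only [countRun, beq_self_eq_true, if_true, List.foldl_cons, grpStep]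
      rw [ih]
      ring_nf
    · simp [countRun, hx]

-- the rest after a run does not start with k
theorem countRun_rest_head (k : String) (xs : List String) (y : String) (r : List String)
    (h : (countRun k xs).2 = y :: r) : y ≠ k := by
  induction xs with
  | nil => simp [countRun] at h
  | cons x xs ih =>
    by_cases hx : x = k
    · subst hx; simp only [countRun, beq_self_eq_true, if_true] at h; exact ih h
    · simp only [countRun, beq_iff_eq, hx, if_false] at h
      intro hk
      apply hx
      injection h with h1 _
      rw [h1, hk]

-- grpStep never touches groups below the head: a fixed suffix (k, n) :: gs is preserved
-- (the head group's count may grow)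
theorem foldl_grpStep_suffix (xs : List String) (acc : List (String × Nat)) (k : String)
    (n : Nat) (gs : List (String × Nat)) :
    ∃ acc2 n2, List.foldl grpStep (acc ++ (k, n) :: gs) xs = acc2 ++ (k, n2) :: gs := by
  induction xs generalizing acc n with
  | nil => exact ⟨acc, n, rfl⟩
  | cons x xs ih =>
    cases acc with
    | nil =>
      simp only [List.nil_append, List.foldl_cons, grpStep]
      by_cases hk : k = x
      · subst hk
        simp only [beq_self_eq_true, if_true]
        obtain ⟨a2, n2, h⟩ := ih [] (n + 1)
        exact ⟨a2, n2, by simpa using h⟩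
      · simp only [beq_iff_eq, hk, if_false]
        exact ih [(x, 1)] n
    | cons g t =>
      obtain ⟨gk, gn⟩ := g
      simp only [List.cons_append, List.foldl_cons, grpStep]
      by_cases hk : gk = x
      · simp only [hk, beq_self_eq_true, if_true]
        exact ih ((x, gn + 1) :: t) n
      · simp only [beq_iff_eq, hk, if_false]
        exact ih ((x, 1) :: (gk, gn) :: t) n

-- ===== VERDICT (by name: the statement is the Claim_ definition above) =====
theorem parse_grammar_3_spec : Claim_equal_parse_grammar_3 := by
  intro tokens _
  show parse_grammar_3 tokens = parse_grammar_3_alt tokens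
  match tokens with
  | [] => rfl
  | [x] => simp [parse_grammar_3, parse_grammar_3_alt, grpStep]
  | x :: y :: zs =>
    by_cases hxa : x = "a"
    · subst hxa
      have hc1 := countRun_cons_pos "a" "a" (y :: zs) rfl
      have hA : parse_grammar_3 ("a" :: y :: zs)
          = (decide (0 < (countRun "b" (countRun "a" (y :: zs)).2).1)
              && (countRun "b" (countRun "a" (y :: zs)).2).2.isEmpty) := by
        simp [parse_grammar_3, hc1]
      have hB : List.foldl grpStep [] ("a" :: y :: zs)
          = List.foldl grpStep [("a", 1 + (countRun "a" (y :: zs)).1)]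
              (countRun "a" (y :: zs)).2 := by
        simpa [grpStep] using foldl_grpStep_run (y :: zs) "a" 1 []
      cases hrest : (countRun "a" (y :: zs)).2 with
      | nil =>
        rw [hrest] at hA hB
        rw [hA, parse_grammar_3_alt, hB]
        simp [countRun]
      | cons z zr =>
        have hza : z ≠ "a" := countRun_rest_head _ _ _ _ hrest
        rw [hrest] at hA hB
        by_cases hzb : z = "b"
        · subst hzb
          have hc2 := countRun_cons_pos "b" "b" zr rfl
          rw [hc2] at hA
          have hB2 : List.foldl grpStep [("a", 1 + (countRun "a" (y :: zs)).1)] ("b" :: zr)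
              = List.foldl grpStep
                  [("b", 1 + (countRun "b" zr).1), ("a", 1 + (countRun "a" (y :: zs)).1)]
                  (countRun "b" zr).2 := by
            simpa [grpStep] using
              foldl_grpStep_run zr "b" 1 [("a", 1 + (countRun "a" (y :: zs)).1)]
          cases hr2 : (countRun "b" zr).2 with
          | nil =>
            rw [hr2] at hA hB2
            rw [hA, parse_grammar_3_alt, hB, hB2]
            simp
          | cons w wr =>
            have hwb : w ≠ "b" := countRun_rest_head _ _ _ _ hr2
            rw [hr2] at hA hB2
            obtain ⟨acc2, n2, hfix⟩ := foldl_grpStep_suffix wr [] w 1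
              [("b", 1 + (countRun "b" zr).1), ("a", 1 + (countRun "a" (y :: zs)).1)]
            simp only [List.nil_append] at hfix
            rw [hA, parse_grammar_3_alt, hB, hB2]
            simp only [List.foldl_cons, grpStep, beq_iff_eq]
            rw [if_neg (fun h => hwb h.symm), hfix]
            simp
        · have hc2 := countRun_cons_neg "b" z zr hzb
          rw [hc2] at hA
          obtain ⟨acc2, n2, hfix⟩ := foldl_grpStep_suffix zr [] z 1
            [("a", 1 + (countRun "a" (y :: zs)).1)]
          simp only [List.nil_append] at hfix
          rw [hA, parse_grammar_3_alt, hB]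
          simp only [List.foldl_cons, grpStep, beq_iff_eq]
          rw [if_neg (fun h => hza h.symm), hfix]
          cases hrev : acc2.reverse with
          | nil => simp [hrev, hzb]
          | cons h2 t2 => simp [hrev]
    · have hc1 := countRun_cons_neg "a" x (y :: zs) hxa
      have hA : parse_grammar_3 (x :: y :: zs) = false := by
        simp [parse_grammar_3, hc1]
      obtain ⟨acc2, n2, hfix⟩ := foldl_grpStep_suffix (y :: zs) [] x 1 []
      simp only [List.nil_append] at hfix
      rw [hA, parse_grammar_3_alt]
      have hstart : List.foldl grpStep [] (x :: y :: zs)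
          = List.foldl grpStep [(x, 1)] (y :: zs) := rfl
      rw [hstart, hfix]
      cases hrev : acc2.reverse with
      | nil => simp [hrev]
      | cons h2 t2 =>
        cases t2 with
        | nil => simp [hrev, hxa]
        | cons h3 t3 => simp [hrev]
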